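-- pv_equiv track=rewrite | github.com/wadansyaku/band-part-key-app | core/precise_extractor.py | _group_into_systems
-- ===== SOURCE A (Python) =====
-- def _group_into_systems(ranges):
--     """楽器をシステムにグループ化"""
--     if not ranges:
--         return []
--
--     systems = []
--     current_system = [ranges[0]]
--
--     for inst in ranges[1:]:
--         # 大きなギャップがあれば新しいシステム
--         if inst['y'] - current_system[-1]['y'] > 200:
--             systems.append(current_system)
--             current_system = [inst]
--         else:
--             current_system.append(inst)
--
--     if current_system:
--         systems.append(current_system)
--
--     return systems
-- ===== SOURCE B (Python) =====
-- def _group_into_systems(ranges):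
--     """Group instruments into systems: collect all break indices first, then slice."""
--     if not ranges:
--         return []
--     n = len(ranges)
--     cuts = [i for i in range(1, n) if ranges[i]['y'] - ranges[i - 1]['y'] > 200]
--     bounds = [0] + cuts + [n]
--     return [ranges[bounds[j]:bounds[j + 1]] for j in range(len(bounds) - 1)]
-- ===== Notes on version B (the rewrite author's own statement) =====
-- stated objective: alternative
-- what changed: B is two-phase: it first collects every break index where the y-gap exceeds 200 into a cut list, then partitions the input by slicing between consecutive boundaries, instead of A's single accumulator loop that grows a current group.
import Mathlib
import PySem

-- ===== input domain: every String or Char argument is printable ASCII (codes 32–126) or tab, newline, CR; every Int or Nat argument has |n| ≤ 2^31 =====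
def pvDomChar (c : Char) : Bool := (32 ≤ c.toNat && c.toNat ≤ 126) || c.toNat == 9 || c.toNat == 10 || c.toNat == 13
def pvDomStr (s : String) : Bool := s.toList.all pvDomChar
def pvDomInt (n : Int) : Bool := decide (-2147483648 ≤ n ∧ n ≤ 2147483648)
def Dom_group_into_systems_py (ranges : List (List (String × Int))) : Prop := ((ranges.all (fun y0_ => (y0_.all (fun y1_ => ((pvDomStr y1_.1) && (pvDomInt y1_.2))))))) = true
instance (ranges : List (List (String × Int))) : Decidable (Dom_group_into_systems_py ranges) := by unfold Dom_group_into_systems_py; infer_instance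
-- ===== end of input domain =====

-- B restructures A's single accumulator loop into two phases (collect cut indices, then slice); same O(n) cost, different decomposition.

-- ===== PORT A =====
-- inst['y'] — first-match association-list lookup; default 0 is never used inside Pre_ (key "y" present).
def pyY (r : List (String × Int)) : Int := PySem.Dict.getD (PySem.Dict.mk r) "y" 0

-- the 'for inst in ranges[1:]' loop with state (systems, current_system);
-- current_system[-1] ported as getLastD [] — exact since current_system is always nonempty.
def loopA : List (List (String × Int)) → List (List (List (String × Int))) → List (List (String × Int)) →
    List (List (List (String × Int))) × List (List (String × Int))
  | [], systems, current => (systems, current)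
  | inst :: rest, systems, current =>
    if pyY inst - pyY (current.getLastD []) > 200 then
      loopA rest (systems ++ [current]) [inst]
    else
      loopA rest systems (current ++ [inst])

def group_into_systems_py (ranges : List (List (String × Int))) : List (List (List (String × Int))) :=
  match ranges with
  | [] => []
  | r0 :: rest =>
    let p := loopA rest [] [r0]
    if p.2 ≠ [] then p.1 ++ [p.2] else p.1

-- ===== PORT B =====
-- cut condition: ranges[i]['y'] - ranges[i-1]['y'] > 200 (indices always in range inside B's loops)
def cutCond (xs : List (List (String × Int))) (i : Int) : Bool :=
  decide (pyY (PySem.List.pyGetD xs i []) - pyY (PySem.List.pyGetD xs (i - 1) []) > 200)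

-- cuts = [i for i in range(1, n) if …]
def cutsOf (xs : List (List (String × Int))) : List Int :=
  (PySem.List.pyRange 1 (xs.length : Int) 1).filter (cutCond xs)

-- bounds = [0] + cuts + [n]
def boundsOf (xs : List (List (String × Int))) : List Int :=
  0 :: (cutsOf xs ++ [(xs.length : Int)])

def group_into_systems_py_alt (ranges : List (List (String × Int))) : List (List (List (String × Int))) :=
  if ranges = [] then []
  else
    (PySem.List.pyRange 0 (((boundsOf ranges).length : Int) - 1) 1).map (fun j =>
      PySem.List.slice ranges (some (PySem.List.pyGetD (boundsOf ranges) j 0))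
        (some (PySem.List.pyGetD (boundsOf ranges) (j + 1) 0)))

-- ===== PRECONDITION & SPEC =====
-- Pre_ excludes exactly the inputs on which Python A raises KeyError: with ≥ 2 instruments every
-- dict's 'y' key is looked up, so each must contain the key "y".
def Pre_group_into_systems_py (ranges : List (List (String × Int))) : Prop :=
  ranges.length ≤ 1 ∨ ∀ r ∈ ranges, PySem.Dict.contains (PySem.Dict.mk r) "y" = true
instance (ranges : List (List (String × Int))) : Decidable (Pre_group_into_systems_py ranges) := by
  unfold Pre_group_into_systems_py; infer_instance

def pvWitness_group_into_systems_py : (List (List (String × Int))) :=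
  [[("y", 0)], [("y", 100)], [("y", 400)]]

def Spec_group_into_systems_py (ranges : List (List (String × Int))) (out : List (List (List (String × Int)))) : Prop := out = group_into_systems_py_alt ranges
instance (ranges : List (List (String × Int))) (out : List (List (List (String × Int)))) : Decidable (Spec_group_into_systems_py ranges out) := by unfold Spec_group_into_systems_py; infer_instance

-- ===== CLAIM (what is proved, stated in full; the proofs are below) =====
def Claim_equal_group_into_systems_py : Prop := ∀ (ranges : List (List (String × Int))), Dom_group_into_systems_py ranges → Pre_group_into_systems_py ranges → Spec_group_into_systems_py ranges (group_into_systems_py ranges)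

-- ===== LEMMAS AND PROOFS =====

-- A common recursive characterisation of the grouping, used as the bridge between the two ports.
def chunks : List (List (String × Int)) → List (List (List (String × Int)))
  | [] => []
  | a :: l =>
    match chunks l with
    | [] => [[a]]
    | c :: cs => if pyY (c.headD []) - pyY a > 200 then [a] :: c :: cs else (a :: c) :: cs

def prependFirst (pre : List (List (String × Int))) :
    List (List (List (String × Int))) → List (List (List (String × Int)))
  | [] => []
  | c :: cs => (pre ++ c) :: cs

theorem chunks_cons (a : List (String × Int)) (l : List (List (String × Int))) :
    chunks (a :: l) = match chunks l with
      | [] => [[a]]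
      | c :: cs => if pyY (c.headD []) - pyY a > 200 then [a] :: c :: cs else (a :: c) :: cs := rfl

theorem prependFirst_comp (p q : List (List (String × Int)))
    (x : List (List (List (String × Int)))) :
    prependFirst p (prependFirst q x) = prependFirst (p ++ q) x := by
  cases x <;> simp [prependFirst]

-- chunks (a :: l) always starts with a chunk whose head is a
theorem chunks_cons_shape (l : List (List (String × Int))) (a : List (String × Int)) :
    ∃ t cs, chunks (a :: l) = (a :: t) :: cs := by
  rw [chunks_cons]
  cases h : chunks l with
  | nil => exact ⟨[], [], rfl⟩
  | cons c cs =>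
    by_cases hg : pyY (c.headD []) - pyY a > 200
    · exact ⟨[], c :: cs, by dsimp only; rw [if_pos hg]⟩
    · exact ⟨c, cs, by dsimp only; rw [if_neg hg]⟩

theorem loopA_acc (l : List (List (String × Int))) :
    ∀ sys cur, loopA l sys cur = (sys ++ (loopA l [] cur).1, (loopA l [] cur).2) := by
  induction l with
  | nil => intro sys cur; simp [loopA]
  | cons i t ih =>
    intro sys cur
    by_cases hg : pyY i - pyY (cur.getLastD []) > 200
    · simp only [loopA, if_pos hg, List.nil_append]
      rw [ih (sys ++ [cur]) [i], ih [cur] [i]]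
      simp
    · simp only [loopA, if_neg hg, List.nil_append]
      rw [ih sys (cur ++ [i])]

def outA (l : List (List (String × Int))) (cur : List (List (String × Int))) :
    List (List (List (String × Int))) :=
  (loopA l [] cur).1 ++ [(loopA l [] cur).2]

theorem outA_nil (cur : List (List (String × Int))) : outA [] cur = [cur] := rfl

theorem outA_cons (i : List (String × Int)) (t cur : List (List (String × Int))) :
    outA (i :: t) cur =
      if pyY i - pyY (cur.getLastD []) > 200 then cur :: outA t [i] else outA t (cur ++ [i]) := by
  by_cases hg : pyY i - pyY (cur.getLastD []) > 200
  · simp only [outA, loopA, if_pos hg, List.nil_append]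
    rw [loopA_acc t [cur] [i]]
    simp
  · simp only [outA, loopA, if_neg hg, List.nil_append]

theorem getLastD_singleton' (a d : List (String × Int)) : ([a] : List _).getLastD d = a := rfl

theorem outA_prepend (l : List (List (String × Int))) :
    ∀ (pre : List (List (String × Int))) (a : List (String × Int)),
      outA l (pre ++ [a]) = prependFirst pre (outA l [a]) := by
  induction l with
  | nil => intro pre a; simp [outA_nil, prependFirst]
  | cons i t ih =>
    intro pre a
    rw [outA_cons, outA_cons, List.getLastD_concat, getLastD_singleton']
    by_cases hg : pyY i - pyY a > 200
    · simp [hg, prependFirst]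
    · rw [if_neg hg, if_neg hg]
      calc outA t (pre ++ [a] ++ [i])
          = prependFirst (pre ++ [a]) (outA t [i]) := ih (pre ++ [a]) i
        _ = prependFirst pre (prependFirst [a] (outA t [i])) :=
            (prependFirst_comp pre [a] _).symm
        _ = prependFirst pre (outA t ([a] ++ [i])) := by rw [ih [a] i]

theorem outA_eq_chunks (l : List (List (String × Int))) :
    ∀ a, outA l [a] = chunks (a :: l) := by
  induction l with
  | nil => intro a; rfl
  | cons i t ih =>
    intro a
    rw [outA_cons, getLastD_singleton']
    obtain ⟨t', cs, hshape⟩ := chunks_cons_shape t i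
    rw [chunks_cons, hshape]
    dsimp only [List.headD_cons]
    by_cases hg : pyY i - pyY a > 200
    · rw [if_pos hg, if_pos hg, ih i, hshape]
    · rw [if_neg hg, if_neg hg]
      have h2 : outA t ([a] ++ [i]) = prependFirst [a] (outA t [i]) := outA_prepend t [a] i
      rw [h2, ih i, hshape]
      rfl

theorem loopA_snd_ne (l : List (List (String × Int))) :
    ∀ sys cur, cur ≠ [] → (loopA l sys cur).2 ≠ [] := by
  induction l with
  | nil => intro sys cur h; simpa [loopA]
  | cons i t ih =>
    intro sys cur h
    by_cases hg : pyY i - pyY (cur.getLastD []) > 200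
    · simp only [loopA, if_pos hg]; exact ih _ _ (by simp)
    · simp only [loopA, if_neg hg]; exact ih _ _ (by simp)

theorem A_eq_chunks (ranges : List (List (String × Int))) :
    group_into_systems_py ranges = chunks ranges := by
  cases ranges with
  | nil => rfl
  | cons r rest =>
    have hne : (loopA rest [] [r]).2 ≠ [] := loopA_snd_ne rest [] [r] (by simp)
    simp only [group_into_systems_py, if_pos hne]
    exact outA_eq_chunks rest r

-- ---- B side ----

-- recursive view of the slice comprehension: consecutive boundary pairs
def zipSlices : List Int → List (List (String × Int)) → List (List (List (String × Int)))
  | b :: b' :: t, xs => PySem.List.slice xs (some b) (some b') :: zipSlices (b' :: t) xs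
  | _, _ => []

theorem pyGetD_cons_pos {α : Type} (a : α) (l : List α) (d : α) (i : Int) (h : 1 ≤ i) :
    PySem.List.pyGetD (a :: l) i d = PySem.List.pyGetD l (i - 1) d := by
  obtain ⟨m, hm⟩ : ∃ m : Nat, i = ((m : Int) + 1) := ⟨(i - 1).toNat, by omega⟩
  subst hm
  have h1 : ((m : Int) + 1) = (((m + 1 : Nat)) : Int) := by push_cast; ring
  rw [h1, PySem.List.pyGetD_natCast]
  simp [PySem.List.pyGetD_natCast]

theorem pyRange_succ_shift (N : Int) :
    PySem.List.pyRange 1 N 1 = (PySem.List.pyRange 0 (N - 1) 1).map (· + 1) := by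
  rw [PySem.List.pyRange_one, PySem.List.pyRange_one, List.map_map]
  have h : (N - 1).toNat = (N - 1 - 0).toNat := by omega
  rw [h]
  apply List.map_congr_left
  intro k _
  simp
  omega

theorem map_pyRange_eq_zipSlices (bs : List Int) (xs : List (List (String × Int))) :
    (PySem.List.pyRange 0 ((bs.length : Int) - 1) 1).map (fun j =>
      PySem.List.slice xs (some (PySem.List.pyGetD bs j 0))
        (some (PySem.List.pyGetD bs (j + 1) 0))) = zipSlices bs xs := by
  induction bs with
  | nil => rw [PySem.List.pyRange_one_eq_nil (by norm_num)]; rfl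
  | cons b bs ih =>
    cases bs with
    | nil =>
      rw [show ((([b] : List Int).length : Int) - 1) = 0 by norm_num,
        PySem.List.pyRange_one_eq_nil (by norm_num)]
      rfl
    | cons b' t =>
      have hN : (0 : Int) < ((b :: b' :: t).length : Int) - 1 := by simp
      rw [PySem.List.pyRange_one_cons hN, List.map_cons]
      have hf0 : PySem.List.slice xs (some (PySem.List.pyGetD (b :: b' :: t) 0 0))
          (some (PySem.List.pyGetD (b :: b' :: t) (0 + 1) 0)) =
          PySem.List.slice xs (some b) (some b') := by
        rw [PySem.List.pyGetD_zero_cons, show (0 + 1 : Int) = 1 by norm_num,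
          pyGetD_cons_pos _ _ _ 1 (by norm_num)]
        norm_num [PySem.List.pyGetD_zero_cons]
      rw [hf0]
      have hsh : PySem.List.pyRange 1 (((b :: b' :: t).length : Int) - 1) 1 =
          (PySem.List.pyRange 0 ((((b' :: t) : List Int).length : Int) - 1) 1).map (· + 1) := by
        rw [pyRange_succ_shift]
        congr 2
        simp
      rw [show (0 : Int) + 1 = 1 from by norm_num, hsh, List.map_map]
      simp only [zipSlices]
      congr 1
      rw [← ih]
      apply List.map_congr_left
      intro j hj
      have hj0 : 0 ≤ j := ((PySem.List.mem_pyRange_one).1 hj).1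
      simp only [Function.comp]
      rw [pyGetD_cons_pos _ _ _ (j + 1) (by omega),
        pyGetD_cons_pos _ _ _ (j + 1 + 1) (by omega)]
      norm_num

theorem slice_shift (xs : List (List (String × Int))) (a : List (String × Int)) (p q : Int)
    (hp : 0 ≤ p) (hq : 0 ≤ q) :
    PySem.List.slice (a :: xs) (some (p + 1)) (some (q + 1)) = PySem.List.slice xs (some p) (some q) := by
  rw [PySem.List.slice_toNat _ (by omega) (by omega), PySem.List.slice_toNat _ hp hq]
  have h1 : (p + 1).toNat = p.toNat + 1 := by omega
  have h2 : (q + 1).toNat = q.toNat + 1 := by omega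
  rw [h1, h2, List.drop_succ_cons]
  congr 1
  omega

theorem zipSlices_shift (bs : List Int) (xs : List (List (String × Int)))
    (a : List (String × Int)) (h : ∀ x ∈ bs, 0 ≤ x) :
    zipSlices (bs.map (· + 1)) (a :: xs) = zipSlices bs xs := by
  induction bs with
  | nil => rfl
  | cons b bs ih =>
    cases bs with
    | nil => rfl
    | cons b' t =>
      simp only [List.map_cons, zipSlices]
      rw [slice_shift xs a b b' (h b (by simp)) (h b' (by simp)),
        show ((b' + 1) :: t.map (· + 1)) = (b' :: t).map (· + 1) from rfl,
        ih (fun x hx => h x (by simp [hx]))]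

theorem pyRange_shift (a N : Int) :
    PySem.List.pyRange (a + 1) N 1 = (PySem.List.pyRange a (N - 1) 1).map (· + 1) := by
  rw [PySem.List.pyRange_one, PySem.List.pyRange_one, List.map_map]
  have h : (N - (a + 1)).toNat = (N - 1 - a).toNat := by omega
  rw [h]
  apply List.map_congr_left
  intro k _
  simp
  omega

theorem cutsOf_cons (a b : List (String × Int)) (t : List (List (String × Int))) :
    cutsOf (a :: b :: t) =
      (if pyY b - pyY a > 200 then [1] else []) ++ (cutsOf (b :: t)).map (· + 1) := by
  have hn : (1 : Int) < ((a :: b :: t).length : Int) := by simp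
  unfold cutsOf
  rw [PySem.List.pyRange_one_cons hn, List.filter_cons]
  have hc1 : cutCond (a :: b :: t) 1 = decide (pyY b - pyY a > 200) := by
    unfold cutCond
    rw [pyGetD_cons_pos _ _ _ 1 (by norm_num)]
    norm_num [PySem.List.pyGetD_zero_cons]
  have hsh : PySem.List.pyRange (1 + 1) (((a :: b :: t).length : Int)) 1 =
      (PySem.List.pyRange 1 (((b :: t).length : Int)) 1).map (· + 1) := by
    rw [pyRange_shift]
    congr 2
    simp
  rw [hsh, List.filter_map]
  have hfil : (PySem.List.pyRange 1 (((b :: t).length : Int)) 1).filter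
      (cutCond (a :: b :: t) ∘ (· + 1)) =
      (PySem.List.pyRange 1 (((b :: t).length : Int)) 1).filter (cutCond (b :: t)) := by
    apply List.filter_congr
    intro i hi
    have hi1 : 1 ≤ i := (PySem.List.mem_pyRange_one.1 hi).1
    simp only [Function.comp]
    unfold cutCond
    rw [pyGetD_cons_pos a _ _ (i + 1) (by omega), show i + 1 - 1 = i from by ring,
      pyGetD_cons_pos a (b :: t) [] i hi1]
  rw [hfil, hc1]
  by_cases hg : pyY b - pyY a > 200 <;> simp [hg]

theorem mem_cutsOf_pos (xs : List (List (String × Int))) (x : Int) (h : x ∈ cutsOf xs) : 1 ≤ x := by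
  unfold cutsOf at h
  exact (PySem.List.mem_pyRange_one.1 (List.mem_filter.1 h).1).1

theorem mem_boundsOf_nonneg (xs : List (List (String × Int))) (x : Int)
    (h : x ∈ boundsOf xs) : 0 ≤ x := by
  unfold boundsOf at h
  rcases List.mem_cons.1 h with h | h
  · omega
  rcases List.mem_append.1 h with h | h
  · have := mem_cutsOf_pos xs x h; omega
  · simp at h; omega

theorem slice_zero_succ (l : List (List (String × Int))) (a : List (String × Int)) (u : Int)
    (hu : 0 ≤ u) :
    PySem.List.slice (a :: l) (some 0) (some (u + 1)) = a :: PySem.List.slice l (some 0) (some u) := by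
  rw [PySem.List.slice_toNat _ (by norm_num) (by omega), PySem.List.slice_toNat _ (by norm_num) hu]
  have h1 : (u + 1).toNat = u.toNat + 1 := by omega
  simp [h1]

theorem zipSlices_bounds_eq_chunks (xs : List (List (String × Int))) (hxs : xs ≠ []) :
    zipSlices (boundsOf xs) xs = chunks xs := by
  induction xs with
  | nil => exact absurd rfl hxs
  | cons a l ih =>
    cases l with
    | nil =>
      have hc : cutsOf [a] = [] := by
        unfold cutsOf
        rw [PySem.List.pyRange_one_eq_nil (by simp)]
        rfl
      have hb : boundsOf [a] = [0, 1] := by rw [boundsOf, hc]; rfl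
      rw [hb]
      simp only [zipSlices]
      rw [PySem.List.slice_toNat _ (by norm_num) (by norm_num)]
      rfl
    | cons b t =>
      have hne : (b :: t) ≠ ([] : List (List (String × Int))) := by simp
      have ihbt := ih hne
      have hlen : ((a :: b :: t).length : Int) = ((b :: t).length : Int) + 1 := by simp
      have hbl : boundsOf (a :: b :: t) =
          0 :: (cutsOf (a :: b :: t) ++ [((b :: t).length : Int) + 1]) := by
        rw [boundsOf, hlen]
      obtain ⟨t', cs, hshape⟩ := chunks_cons_shape t b
      by_cases hg : pyY b - pyY a > 200
      · have hmap : boundsOf (a :: b :: t) = 0 :: (boundsOf (b :: t)).map (· + 1) := by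
          rw [hbl, cutsOf_cons, if_pos hg, boundsOf]
          simp
        have hnest : (boundsOf (b :: t)).map (· + 1) =
            1 :: ((cutsOf (b :: t) ++ [((b :: t).length : Int)]).map (· + 1)) := by
          rw [boundsOf]; simp
        rw [hmap, hnest]
        simp only [zipSlices]
        rw [← hnest, zipSlices_shift _ _ _ (mem_boundsOf_nonneg (b :: t)), ihbt]
        have hs : PySem.List.slice (a :: b :: t) (some 0) (some 1) = [a] := by
          rw [show (1 : Int) = 0 + 1 from by norm_num, slice_zero_succ _ _ 0 le_rfl]
          rw [PySem.List.slice_toNat _ le_rfl le_rfl]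
          rfl
        rw [hs, hshape, chunks_cons a (b :: t), hshape]
        dsimp only [List.headD_cons]
        rw [if_pos hg]
      · have hmap : boundsOf (a :: b :: t) =
            0 :: ((cutsOf (b :: t) ++ [((b :: t).length : Int)]).map (· + 1)) := by
          rw [hbl, cutsOf_cons, if_neg hg]
          simp
        obtain ⟨u1, u', hu⟩ := List.exists_cons_of_ne_nil
          (by simp : cutsOf (b :: t) ++ [((b :: t).length : Int)] ≠ [])
        have huneg : ∀ x ∈ (u1 :: u'), 0 ≤ x := by
          intro x hx
          exact mem_boundsOf_nonneg (b :: t) x (by rw [boundsOf, hu]; exact List.mem_cons_of_mem _ hx)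
        have hu1 : 0 ≤ u1 := huneg u1 (by simp)
        have hblbt : boundsOf (b :: t) = 0 :: u1 :: u' := by rw [boundsOf, hu]
        rw [hmap, hu]
        simp only [List.map_cons, zipSlices]
        rw [show ((u1 + 1) :: u'.map (· + 1)) = ((u1 :: u').map (· + 1)) from rfl,
          zipSlices_shift _ _ _ huneg]
        rw [hblbt] at ihbt
        simp only [zipSlices] at ihbt
        rw [hshape] at ihbt
        obtain ⟨hsl, hrest⟩ := List.cons_eq_cons.mp ihbt
        rw [slice_zero_succ _ _ u1 hu1, hsl, hrest]
        rw [chunks_cons a (b :: t), hshape]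
        dsimp only [List.headD_cons]
        rw [if_neg hg]


theorem B_eq_chunks (ranges : List (List (String × Int))) :
    group_into_systems_py_alt ranges = chunks ranges := by
  cases ranges with
  | nil => rfl
  | cons a l =>
    have hne : (a :: l) ≠ ([] : List (List (String × Int))) := by simp
    simp only [group_into_systems_py_alt, if_neg hne]
    rw [map_pyRange_eq_zipSlices (boundsOf (a :: l)) (a :: l)]
    exact zipSlices_bounds_eq_chunks (a :: l) hne


-- ===== VERDICT (by name: the statement is the Claim_ definition above) =====
theorem group_into_systems_py_spec : Claim_equal_group_into_systems_py := by
  intro ranges _ _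
  unfold Spec_group_into_systems_py
  rw [A_eq_chunks, B_eq_chunks]
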